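-- pv_equiv track=rewrite | github.com/jingom368/CoteStudy | 프로그래머스/1/42862. 체육복/체육복.py | solution
-- ===== SOURCE A (Python) =====
-- def solution(n, lost_, reserve_):
--     reserve = sorted([x for x in reserve_ if x not in lost_])
--
--     lost = sorted([x for x in lost_ if x not in reserve_])
--     reserve_o = [[reserve[i]-1,reserve[i]+1] for i in range(len(reserve))]
--     j = 0
--     lost_c = lost.copy()
--     length = len(lost)
--     while j < length:
--         if [number for number in reserve_o if lost_c[j] in number] != []:
--             reserve_o.remove([number for number in reserve_o if lost_c[j] in number][0])
--             lost.remove(lost_c[j])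
--         j = j+1
--     answer = n - len(lost)
--     return answer
-- ===== SOURCE B (Python) =====
-- def solution(n, lost_, reserve_):
--     # Two-pointer merge over the two sorted filtered lists: no pair lists,
--     # no per-student search -- one monotone scan of the reserves.
--     lost_set = set(lost_)
--     res_set = set(reserve_)
--     lost = sorted(l for l in lost_ if l not in res_set)
--     res = sorted(r for r in reserve_ if r not in lost_set)
--     unmatched = 0
--     j = 0
--     m = len(res)
--     for l in lost:
--         while j < m and res[j] < l - 1:
--             j += 1            # too small to help this or any later student
--         if j < m and res[j] <= l + 1:
--             j += 1            # res[j] is l-1 or l+1: lend it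
--         else:
--             unmatched += 1
--     return n - unmatched
-- ===== Notes on version B (the rewrite author's own statement) =====
-- stated objective: faster
-- what changed: Replaces A's per-lost-student scans over a mutable list of [r-1,r+1] pairs (rebuilt-filtered and removed from for every lost student) with a two-pointer merge of the two sorted filtered lists: one monotone pass over the reserves, never building pairs or searching.
import Mathlib
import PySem

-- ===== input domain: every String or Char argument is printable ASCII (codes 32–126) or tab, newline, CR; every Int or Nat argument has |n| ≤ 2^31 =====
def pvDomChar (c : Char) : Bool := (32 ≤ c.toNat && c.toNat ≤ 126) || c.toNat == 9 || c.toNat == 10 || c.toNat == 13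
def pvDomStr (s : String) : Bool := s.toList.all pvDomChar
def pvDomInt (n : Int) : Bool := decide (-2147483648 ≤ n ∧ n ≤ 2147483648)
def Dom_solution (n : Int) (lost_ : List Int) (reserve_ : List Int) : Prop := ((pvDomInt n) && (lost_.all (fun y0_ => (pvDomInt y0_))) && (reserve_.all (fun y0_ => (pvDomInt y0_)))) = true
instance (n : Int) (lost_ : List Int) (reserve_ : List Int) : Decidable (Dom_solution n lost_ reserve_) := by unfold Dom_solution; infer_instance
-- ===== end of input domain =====

-- B replaces A's per-lost-student scans over a mutable list of [r-1,r+1] pairs with a two-pointer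
-- merge of the two sorted filtered lists (one monotone pass over the reserves); same return value.

-- ===== PORT A =====
-- one while-loop iteration of A: the comprehension filter, the remove of its first element, the remove from lost
def stepA (st : List (List Int) × List Int) (l : Int) : List (List Int) × List Int :=
  match st.1.filter (fun p => p.contains l) with
  | [] => st
  | m :: _ => ((PySem.List.remove? st.1 m).getD st.1, (PySem.List.remove? st.2 l).getD st.2)

def solution (n : Int) (lost_ : List Int) (reserve_ : List Int) : Int :=
  let reserve := PySem.List.sorted (reserve_.filter (fun x => !(lost_.contains x))) (fun x => x) false
  let lost0 := PySem.List.sorted (lost_.filter (fun x => !(reserve_.contains x))) (fun x => x) false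
  -- [[reserve[i]-1, reserve[i]+1] for i in range(len(reserve))]; the index i is always in range, getD is exact here
  let reserve_o := (List.range reserve.length).map (fun i => [reserve.getD i 0 - 1, reserve.getD i 0 + 1])
  let lost_c := lost0
  let st := (PySem.List.pyRange 0 (PySem.List.len lost_c)).foldl
      (fun st j => stepA st (PySem.List.pyGetD lost_c j 0)) (reserve_o, lost0)
  n - (st.2.length : Int)

-- ===== PORT B =====
-- one for-loop iteration of B on state (remaining reserve suffix, unmatched count):
-- the inner while that advances j past reserves < l-1 is the dropWhile; then one comparison
def stepB (st : List Int × Int) (l : Int) : List Int × Int :=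
  match st.1.dropWhile (fun r => decide (r < l - 1)) with
  | [] => ([], st.2 + 1)
  | r :: t => if r ≤ l + 1 then (t, st.2) else (r :: t, st.2 + 1)

def solution_alt (n : Int) (lost_ : List Int) (reserve_ : List Int) : Int :=
  let lostSet := PySem.Set.ofList lost_
  let resSet := PySem.Set.ofList reserve_
  let lost := PySem.List.sorted (lost_.filter (fun x => !(PySem.Set.contains resSet x))) (fun x => x) false
  let res := PySem.List.sorted (reserve_.filter (fun x => !(PySem.Set.contains lostSet x))) (fun x => x) false
  n - (lost.foldl stepB (res, 0)).2

-- ===== PRECONDITION & SPEC =====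
def Spec_solution (n : Int) (lost_ : List Int) (reserve_ : List Int) (out : Int) : Prop := out = solution_alt n lost_ reserve_
instance (n : Int) (lost_ : List Int) (reserve_ : List Int) (out : Int) : Decidable (Spec_solution n lost_ reserve_ out) := by unfold Spec_solution; infer_instance

-- ===== CLAIM (what is proved, stated in full; the proofs are below) =====
def Claim_equal_solution : Prop := ∀ (n : Int) (lost_ : List Int) (reserve_ : List Int), Dom_solution n lost_ reserve_ → Spec_solution n lost_ reserve_ (solution n lost_ reserve_)

-- ===== LEMMAS AND PROOFS =====

def pairF (r : Int) : List Int := [r - 1, r + 1]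

lemma pairF_inj : Function.Injective pairF := by
  intro a b h
  simp only [pairF, List.cons.injEq] at h
  omega

lemma filter_map_pairF (R : List Int) (l : Int) :
    (R.map pairF).filter (fun p => p.contains l)
      = (R.filter (fun r => r == l - 1 || r == l + 1)).map pairF := by
  rw [List.filter_map]
  congr 1
  apply List.filter_congr
  intro r _
  simp only [Function.comp, pairF, List.contains_cons, List.contains_nil, Bool.or_false]
  by_cases h1 : r = l - 1
  · subst h1; simp
  · by_cases h2 : r = l + 1
    · subst h2; simp
    · have e1 : (l == r - 1) = false := by simp; omega
      have e2 : (l == r + 1) = false := by simp; omega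
      have e3 : (r == l - 1) = false := by simp; omega
      have e4 : (r == l + 1) = false := by simp; omega
      rw [e1, e2, e3, e4]

lemma filter_head_left (R : List Int) (l : Int)
    (hp : R.Pairwise (· ≤ ·)) (hm : (l - 1) ∈ R) :
    ∃ t, R.filter (fun r => r == l - 1 || r == l + 1) = (l - 1) :: t := by
  induction R with
  | nil => simp at hm
  | cons r R ih =>
    rcases List.pairwise_cons.mp hp with ⟨hr, hp'⟩
    by_cases hpred : (r == l - 1 || r == l + 1) = true
    · have hcase : r = l - 1 ∨ r = l + 1 := by simpa using hpred
      have hrl : r = l - 1 := by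
        rcases hcase with h | h
        · exact h
        · exfalso
          have hmem : l - 1 ∈ R := by
            rcases List.mem_cons.mp hm with h' | h'
            · omega
            · exact h'
          have := hr _ hmem
          omega
      exact ⟨R.filter (fun r => r == l - 1 || r == l + 1), by simp [hrl]⟩
    · have hne : r ≠ l - 1 := by
        intro h; apply hpred; simp [h]
      have hm' : l - 1 ∈ R := by
        rcases List.mem_cons.mp hm with h' | h'
        · exact absurd h'.symm hne
        · exact h'
      rcases ih hp' hm' with ⟨t, ht⟩
      exact ⟨t, by simp [hpred, ht]⟩

lemma filter_head_right (R : List Int) (l : Int)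
    (hnm : (l - 1) ∉ R) (hm : (l + 1) ∈ R) :
    ∃ t, R.filter (fun r => r == l - 1 || r == l + 1) = (l + 1) :: t := by
  induction R with
  | nil => simp at hm
  | cons r R ih =>
    have hnm1 : l - 1 ≠ r := fun h => hnm (by simp [h])
    have hnm' : (l - 1) ∉ R := fun h => hnm (List.mem_cons_of_mem _ h)
    by_cases hpred : (r == l - 1 || r == l + 1) = true
    · have hcase : r = l - 1 ∨ r = l + 1 := by simpa using hpred
      have hrl : r = l + 1 := by
        rcases hcase with h | h
        · exact absurd h.symm hnm1
        · exact h
      exact ⟨R.filter (fun r => r == l - 1 || r == l + 1), by simp [hrl]⟩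
    · have hm' : l + 1 ∈ R := by
        rcases List.mem_cons.mp hm with h' | h'
        · exfalso; apply hpred; simp [h'.symm]
        · exact h'
      rcases ih hnm' hm' with ⟨t, ht⟩
      exact ⟨t, by simp [hpred, ht]⟩

lemma filter_none (R : List Int) (l : Int)
    (h1 : (l - 1) ∉ R) (h2 : (l + 1) ∉ R) :
    R.filter (fun r => r == l - 1 || r == l + 1) = [] := by
  rw [List.filter_eq_nil_iff]
  intro r hr
  simp only [Bool.or_eq_true, beq_iff_eq, not_or]
  constructor <;> intro h <;> subst h
  · exact h1 hr
  · exact h2 hr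

lemma stepA_hit (R lostA : List Int) (l a : Int) (t : List Int)
    (hfilt : R.filter (fun r => r == l - 1 || r == l + 1) = a :: t)
    (haR : a ∈ R) (hl : l ∈ lostA) :
    stepA (R.map pairF, lostA) l = ((R.erase a).map pairF, lostA.erase l) := by
  unfold stepA
  simp only [filter_map_pairF]
  rw [hfilt]
  simp only [List.map_cons]
  rw [PySem.List.remove?_eq_some_erase _ _ (List.mem_map_of_mem haR),
      PySem.List.remove?_eq_some_erase _ _ hl]
  simp [List.map_erase pairF_inj]

lemma stepA_miss (R lostA : List Int) (l : Int)
    (h1 : (l - 1) ∉ R) (h2 : (l + 1) ∉ R) :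
    stepA (R.map pairF, lostA) l = (R.map pairF, lostA) := by
  unfold stepA
  simp only [filter_map_pairF, filter_none R l h1 h2, List.map_nil]

lemma dropWhile_head_false {p : Int → Bool} :
    ∀ {xs : List Int} {r : Int} {t : List Int}, xs.dropWhile p = r :: t → p r = false := by
  intro xs
  induction xs with
  | nil => intro r t h; simp [List.dropWhile] at h
  | cons x xs ih =>
    intro r t h
    by_cases hx : p x
    · rw [List.dropWhile_cons_of_pos hx] at h; exact ih h
    · rw [List.dropWhile_cons_of_neg hx] at h
      cases h
      simpa using hx

-- the coupled-loop invariant: A's (pair list, remaining-lost list) against B's (reserve suffix, unmatched count);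
-- D holds the reserves A still carries but the two-pointer has skipped (all too small for every remaining lost)
lemma loop_eq (rest : List Int) :
    ∀ (D R lostA : List Int) (k : Int),
    (D ++ R).Pairwise (· ≤ ·) →
    rest.Pairwise (· ≤ ·) →
    (∀ l ∈ rest, l ∉ R) →
    (∀ d ∈ D, ∀ l ∈ rest, d < l - 1) →
    (∀ v, rest.count v ≤ lostA.count v) →
    ((lostA.length : Int) = (rest.length : Int) + k) →
    (((rest.foldl stepA ((D ++ R).map pairF, lostA)).2.length : Int)
        = (rest.foldl stepB (R, k)).2) := by
  induction rest with
  | nil =>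
    intro D R lostA k _ _ _ _ _ hlen
    simpa using hlen
  | cons l rest ih =>
    intro D R lostA k hp hrp hnR hD hsub hlen
    rcases List.pairwise_cons.mp hrp with ⟨hrl, hrp'⟩
    have hl : l ∈ lostA := by
      have h := hsub l
      have : 0 < lostA.count l := by
        have : 0 < (l :: rest).count l := by simp
        omega
      exact List.count_pos_iff.mp this
    have hsub' : ∀ v, rest.count v ≤ (lostA.erase l).count v := by
      intro v
      by_cases hv : v = l
      · subst hv
        have := hsub v
        simp only [List.count_cons_self] at this
        rw [List.count_erase_self]
        omega
      · rw [List.count_erase_of_ne hv]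
        have := hsub v
        simp only [List.count_cons] at this
        omega
    have hsubm : ∀ v, rest.count v ≤ lostA.count v := by
      intro v
      have := hsub v
      simp only [List.count_cons] at this
      omega
    have hlenE : ((lostA.erase l).length : Int) = (rest.length : Int) + k := by
      rw [List.length_erase_of_mem hl]
      have : 1 ≤ lostA.length := List.length_pos_of_mem hl
      simp only [List.length_cons] at hlen
      omega
    have hlenM : ((lostA).length : Int) = (rest.length : Int) + (k + 1) := by
      simp only [List.length_cons] at hlen
      omega
    simp only [List.foldl_cons]
    -- split R at the reserves the two-pointer skips for this l
    set tk := R.takeWhile (fun r => decide (r < l - 1)) with htk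
    have htksmall : ∀ x ∈ tk, x < l - 1 := by
      intro x hx
      have := List.mem_takeWhile_imp hx
      simpa using this
    have hDsmall : ∀ d ∈ D, d < l - 1 := fun d hd => hD d hd l (by simp)
    cases hdc : R.dropWhile (fun r => decide (r < l - 1)) with
    | nil =>
      have hsplit : R = tk ++ [] := by
        rw [htk, ← hdc]
        exact (List.takeWhile_append_dropWhile).symm
      have hstepBeq : stepB (R, k) l = ([], k + 1) := by
        unfold stepB
        simp only [hdc]
      -- every remaining reserve is < l-1: no match for l nor for any later student
      have hRsmall : ∀ x ∈ R, x < l - 1 := by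
        intro x hx
        rw [hsplit, List.append_nil] at hx
        exact htksmall x hx
      have h1 : (l - 1) ∉ D ++ R := by
        intro h
        rcases List.mem_append.mp h with h | h
        · exact absurd (hDsmall _ h) (by omega)
        · exact absurd (hRsmall _ h) (by omega)
      have h2 : (l + 1) ∉ D ++ R := by
        intro h
        rcases List.mem_append.mp h with h | h
        · exact absurd (hDsmall _ h) (by omega)
        · exact absurd (hRsmall _ h) (by omega)
      rw [stepA_miss _ _ _ h1 h2, hstepBeq]
      have := ih (D ++ R) [] lostA (k + 1)
        (by simpa using hp)
        hrp'
        (by simp)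
        (by
          intro d hd l' hl'
          rcases List.mem_append.mp hd with h | h
          · have := hDsmall d h
            have := hrl l' hl'
            omega
          · have := hRsmall d h
            have := hrl l' hl'
            omega)
        hsubm hlenM
      simpa using this
    | cons r t =>
      have hsplit : R = tk ++ r :: t := by
        rw [htk, ← hdc]
        exact (List.takeWhile_append_dropWhile).symm
      have hrge : ¬ (r < l - 1) := by
        have := dropWhile_head_false (p := fun r => decide (r < l - 1)) hdc
        simpa using this
      have hrR : r ∈ R := by
        rw [hsplit]
        exact List.mem_append_right _ (by simp)
      have htR : ∀ x ∈ t, x ∈ R := by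
        intro x hx
        rw [hsplit]
        exact List.mem_append_right _ (by simp [hx])
      have hrne : r ≠ l := by
        intro h
        exact hnR l (by simp) (h ▸ hrR)
      have hpR : R.Pairwise (· ≤ ·) := hp.sublist (List.sublist_append_right D R)
      have hrt : ∀ x ∈ t, r ≤ x := by
        have hpdr : (r :: t).Pairwise (· ≤ ·) := by
          rw [← hdc]
          exact hpR.sublist (List.dropWhile_sublist _)
        exact (List.pairwise_cons.mp hpdr).1
      by_cases hle : r ≤ l + 1
      · -- r is l-1 or l+1: both programs lend it
        have hstepBeq : stepB (R, k) l = (t, k) := by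
          unfold stepB
          simp only [hdc]
          rw [if_pos hle]
        have hr2 : r = l - 1 ∨ r = l + 1 := by omega
        have hnotD : ∀ a : Int, l - 1 ≤ a → a ∉ D ++ tk := by
          intro a ha hmem
          rcases List.mem_append.mp hmem with h | h
          · exact absurd (hDsmall _ h) (by omega)
          · exact absurd (htksmall _ h) (by omega)
        have heq : (D ++ R).erase r = (D ++ tk) ++ t := by
          rw [hsplit, ← List.append_assoc]
          rw [List.erase_append_right _ (hnotD r (by omega))]
          simp
        have hfilt : ∃ t', (D ++ R).filter (fun x => x == l - 1 || x == l + 1) = r :: t' := by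
          rcases hr2 with h | h
          · subst h
            exact filter_head_left _ _ hp (List.mem_append_right _ hrR)
          · subst h
            apply filter_head_right _ _ _ (List.mem_append_right _ hrR)
            intro hmem
            rcases List.mem_append.mp hmem with hmm | hmm
            · exact absurd (hDsmall _ hmm) (by omega)
            · rw [hsplit] at hmm
              rcases List.mem_append.mp hmm with hmm | hmm
              · exact absurd (htksmall _ hmm) (by omega)
              · rcases List.mem_cons.mp hmm with hmm | hmm
                · omega
                · have := hrt _ hmm
                  omega
        rcases hfilt with ⟨t', ht'⟩
        rw [stepA_hit _ _ _ _ _ ht' (List.mem_append_right _ hrR) hl, heq, hstepBeq]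
        have := ih (D ++ tk) t (lostA.erase l) k
          (by
            rw [← heq]
            exact hp.sublist (List.erase_sublist ..))
          hrp'
          (fun l' hl' hmem => hnR l' (by simp [hl']) (htR _ hmem))
          (by
            intro d hd l' hl'
            have hsm : d < l - 1 := by
              rcases List.mem_append.mp hd with h | h
              · exact hDsmall _ h
              · exact htksmall _ h
            have := hrl l' hl'
            omega)
          hsub' hlenE
        exact this
      · -- r > l+1: l gets no suit in either program
        have hstepBeq : stepB (R, k) l = (r :: t, k + 1) := by
          unfold stepB
          simp only [hdc]
          rw [if_neg hle]
        have h1 : (l - 1) ∉ D ++ R := by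
          intro hmem
          rcases List.mem_append.mp hmem with h | h
          · exact absurd (hDsmall _ h) (by omega)
          · rw [hsplit] at h
            rcases List.mem_append.mp h with h | h
            · exact absurd (htksmall _ h) (by omega)
            · rcases List.mem_cons.mp h with h | h
              · omega
              · have := hrt _ h
                omega
        have h2 : (l + 1) ∉ D ++ R := by
          intro hmem
          rcases List.mem_append.mp hmem with h | h
          · exact absurd (hDsmall _ h) (by omega)
          · rw [hsplit] at h
            rcases List.mem_append.mp h with h | h
            · exact absurd (htksmall _ h) (by omega)
            · rcases List.mem_cons.mp h with h | h
              · omega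
              · have := hrt _ h
                omega
        rw [stepA_miss _ _ _ h1 h2, hstepBeq]
        have hstate : (D ++ R) = (D ++ tk) ++ (r :: t) := by
          rw [hsplit, List.append_assoc]
        rw [hstate]
        apply ih (D ++ tk) (r :: t) lostA (k + 1)
        · rw [← hstate]; exact hp
        · exact hrp'
        · intro l' hl' hmem
          apply hnR l' (by simp [hl'])
          rcases List.mem_cons.mp hmem with h | h
          · exact h ▸ hrR
          · exact htR _ h
        · intro d hd l' hl'
          have hsm : d < l - 1 := by
            rcases List.mem_append.mp hd with h | h
            · exact hDsmall _ h
            · exact htksmall _ h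
          have := hrl l' hl'
          omega
        · exact hsubm
        · exact hlenM

lemma ofList_contains (xs : List Int) (v : Int) :
    PySem.Set.contains (PySem.Set.ofList xs) v = xs.contains v := by
  apply Bool.eq_iff_iff.mpr
  simp [PySem.Set.contains_eq_listContains, PySem.Set.mem_ofList]

lemma map_range_getD (xs : List Int) :
    (List.range xs.length).map (fun i => [xs.getD i 0 - 1, xs.getD i 0 + 1]) = xs.map pairF := by
  apply List.ext_getElem
  · simp
  · intro i h1 h2
    simp only [List.getElem_map, List.getElem_range, pairF]
    rw [List.getD_eq_getElem _ _ (by simpa using h2)]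

-- ===== VERDICT (by name: the statement is the Claim_ definition above) =====
theorem solution_spec : Claim_equal_solution := by
  intro n lost_ reserve_ _
  unfold Spec_solution solution solution_alt
  simp only []
  have hfres : (reserve_.filter (fun x => !(PySem.Set.contains (PySem.Set.ofList lost_) x)))
      = reserve_.filter (fun x => !(lost_.contains x)) :=
    List.filter_congr (fun x _ => by rw [ofList_contains])
  have hflost : (lost_.filter (fun x => !(PySem.Set.contains (PySem.Set.ofList reserve_) x)))
      = lost_.filter (fun x => !(reserve_.contains x)) :=
    List.filter_congr (fun x _ => by rw [ofList_contains])
  rw [hfres, hflost]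
  set R := PySem.List.sorted (reserve_.filter (fun x => !(lost_.contains x))) (fun x => x) false with hR
  set L := PySem.List.sorted (lost_.filter (fun x => !(reserve_.contains x))) (fun x => x) false with hL
  rw [map_range_getD]
  rw [PySem.List.foldl_pyRange_pyGetD L 0 stepA _ (le_refl 0)]
  simp only [Int.toNat_zero, List.drop_zero]
  have hpR : R.Pairwise (· ≤ ·) := PySem.List.sorted_pairwise _ _
  have hpL : L.Pairwise (· ≤ ·) := PySem.List.sorted_pairwise _ _
  have hnR : ∀ l ∈ L, l ∉ R := by
    intro l hlmem hrmem
    have hl' : l ∈ lost_.filter (fun x => !(reserve_.contains x)) :=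
      (PySem.List.mem_sorted ..).mp hlmem
    have hr' : l ∈ reserve_.filter (fun x => !(lost_.contains x)) :=
      (PySem.List.mem_sorted ..).mp hrmem
    have h1 := List.of_mem_filter hl'
    have h2 := List.mem_of_mem_filter hr'
    simp only [Bool.not_eq_true', List.contains_eq_mem, decide_eq_false_iff_not] at h1
    exact h1 h2
  have := loop_eq L [] R L 0 (by simpa using hpR) hpL hnR (by simp)
      (fun v => le_refl _) (by simp)
  simp only [List.nil_append] at this
  rw [this]
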